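-- pv_equiv track=rewrite | github.com/pypi-data/pypi-mirror-95 | packages/serializejson/serializejson-0.2.0-py3-none-any.whl/SmartFramework/tools/dictionaries.py | sorted_dict
-- ===== SOURCE A (Python) =====
-- def sorted_dict(dictionary):
--     # make a first pass to know if new dictionary creation is needed
--     last_key = None
--     for key in dictionary:
--         if last_key is None:
--             last_key = key
--         if last_key > key:
--             break
--         last_key = key
--     else:
--         return dictionary
--     # le dictionnaire n'est pas dans l'ordre -> il faut le recopier en le triant
--     return {key: dictionary[key] for key in sorted(dictionary)}
-- ===== SOURCE B (Python) =====
-- def sorted_dict(dictionary):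
--     # Sort the keys once, then decide with a single list comparison whether the
--     # original dict is already in order (returning it unchanged if so).
--     skeys = sorted(dictionary)
--     if list(dictionary) == skeys:
--         return dictionary
--     return {key: dictionary[key] for key in skeys}
-- ===== Notes on version B (the rewrite author's own statement) =====
-- stated objective: simpler
-- what changed: Replaces A's early-exit adjacency scan (sorting only on demand) with sorting the keys once and one list comparison against the sorted key list, which is then reused to build the result.
import Mathlib
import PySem

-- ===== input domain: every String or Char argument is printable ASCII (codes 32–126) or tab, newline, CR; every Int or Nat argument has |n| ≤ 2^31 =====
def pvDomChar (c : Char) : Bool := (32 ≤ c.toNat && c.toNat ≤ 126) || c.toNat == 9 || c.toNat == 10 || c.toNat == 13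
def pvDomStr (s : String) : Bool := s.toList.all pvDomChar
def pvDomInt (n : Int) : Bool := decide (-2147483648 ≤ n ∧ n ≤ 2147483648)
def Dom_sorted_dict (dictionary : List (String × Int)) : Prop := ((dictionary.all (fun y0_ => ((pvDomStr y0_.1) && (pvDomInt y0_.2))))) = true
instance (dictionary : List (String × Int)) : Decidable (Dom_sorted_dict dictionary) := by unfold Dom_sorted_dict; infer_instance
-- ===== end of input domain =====

-- B sorts the keys once and compares the key list against it, instead of A's early-exit
-- adjacency scan that sorts only on demand; objective: simpler (not claimed faster).

-- ===== PORT A =====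
-- A's first pass: last_key starts as None; break (return false) as soon as last_key > key.
def sortedDictScan : Option String → List String → Bool
  | _, [] => true
  | last, k :: rest =>
    let l := match last with | none => k | some s => s
    if l > k then false else sortedDictScan (some k) rest

def sorted_dict (dictionary : List (String × Int)) : List (String × Int) :=
  if sortedDictScan none (dictionary.map Prod.fst) then dictionary
  else
    -- {key: dictionary[key] for key in sorted(dictionary)}; dictionary[key] is a first-match
    -- lookup (getD 0 — the default is never used: every key comes from dictionary)
    ((PySem.List.sorted (dictionary.map Prod.fst) (fun k => k) false).foldl
      (fun acc k => acc.insert k ((PySem.Dict.mk dictionary).getD k 0)) PySem.Dict.empty).items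

-- ===== PORT B =====
def sorted_dict_alt (dictionary : List (String × Int)) : List (String × Int) :=
  let skeys := PySem.List.sorted (dictionary.map Prod.fst) (fun k => k) false
  if dictionary.map Prod.fst = skeys then dictionary
  else
    ((skeys.foldl
      (fun acc k => acc.insert k ((PySem.Dict.mk dictionary).getD k 0)) PySem.Dict.empty)).items

-- ===== PRECONDITION & SPEC =====
def Spec_sorted_dict (dictionary : List (String × Int)) (out : List (String × Int)) : Prop := out = sorted_dict_alt dictionary
instance (dictionary : List (String × Int)) (out : List (String × Int)) : Decidable (Spec_sorted_dict dictionary out) := by unfold Spec_sorted_dict; infer_instance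

-- ===== CLAIM (what is proved, stated in full; the proofs are below) =====
def Claim_equal_sorted_dict : Prop := ∀ (dictionary : List (String × Int)), Dom_sorted_dict dictionary → Spec_sorted_dict dictionary (sorted_dict dictionary)

-- ===== LEMMAS AND PROOFS =====

-- A's scan from a definite last key l succeeds iff l :: ks is adjacently nondecreasing.
theorem sortedDictScan_some (l : String) (ks : List String) :
    sortedDictScan (some l) ks = true ↔ (l :: ks).IsChain (· ≤ ·) := by
  induction ks generalizing l with
  | nil => simp [sortedDictScan]
  | cons k rest ih =>
    simp only [sortedDictScan, List.isChain_cons, List.head?_cons, Option.mem_def,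
      Option.some.injEq, forall_eq']
    by_cases h : l > k
    · simp [h, not_le.mpr h]
    · have hlk : l.toList ≤ k.toList := String.le_iff_toList_le.mp (not_lt.mp h)
      simp [ih, hlk, List.isChain_cons]

theorem sortedDictScan_none (ks : List String) :
    sortedDictScan none ks = true ↔ ks.IsChain (· ≤ ·) := by
  cases ks with
  | nil => simp [sortedDictScan]
  | cons k rest =>
    have : sortedDictScan none (k :: rest) = sortedDictScan (some k) rest := by
      simp [sortedDictScan]
    rw [this, sortedDictScan_some, List.isChain_cons]

-- A's scan succeeds exactly when the key list equals its (stable) sort — B's test.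
theorem scan_iff_sorted_eq (ks : List String) :
    sortedDictScan none ks = true ↔ ks = PySem.List.sorted ks (fun k => k) false := by
  rw [sortedDictScan_none, List.isChain_iff_pairwise]
  constructor
  · intro hp
    exact (PySem.List.sorted_eq_self_of_pairwise ks (fun k => k) hp).symm
  · intro he
    have := PySem.List.sorted_pairwise (xs := ks) (key := fun k : String => k)
    rwa [← he] at this

-- ===== VERDICT (by name: the statement is the Claim_ definition above) =====
theorem sorted_dict_spec : Claim_equal_sorted_dict := by
  intro d _
  unfold Spec_sorted_dict sorted_dict sorted_dict_alt
  by_cases h : sortedDictScan none (d.map Prod.fst) = true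
  · rw [if_pos h, if_pos ((scan_iff_sorted_eq _).mp h)]
  · rw [if_neg h, if_neg (fun he => h ((scan_iff_sorted_eq _).mpr he))]
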